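-- pv_equiv track=rewrite | github.com/wherby/code | contest/00000c275d69/c296/q1/t1.py | minMaxGame
-- ===== SOURCE A (Python) =====
-- def minMaxGame(nums):
--     """
--     :type nums: List[int]
--     :rtype: int
--     """
--     def fn(ls):
--         if len(ls) ==1:
--             return ls[0]
--         tls = []
--         flip =0
--         for i in range(0,len(ls),2):
--             if flip %2 ==0:
--                 tls.append(min(ls[i],ls[i+1]))
--             else:
--                 tls.append(max(ls[i],ls[i+1]))
--             flip +=1
--         return fn(tls)
--
--     return fn(nums)
-- ===== SOURCE B (Python) =====
-- def minMaxGame(nums):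
--     cur = nums
--     while len(cur) != 1:
--         cur = [min(cur[2 * j], cur[2 * j + 1]) if j % 2 == 0
--                else max(cur[2 * j], cur[2 * j + 1])
--                for j in range(len(cur) // 2)]
--     return cur[0]
-- ===== Notes on version B (the rewrite author's own statement) =====
-- stated objective: alternative
-- what changed: Replaces A's outer recursion with an inner index loop (step 2, separate integer flip accumulator, list appends) by an iterative while-loop whose pass is a comprehension over range(len//2) that picks min/max from the pair index's own parity.
-- outside the precondition, e.g. on minMaxGame([]): A raises RecursionError, B does not finish within the time limit
import Mathlib
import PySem

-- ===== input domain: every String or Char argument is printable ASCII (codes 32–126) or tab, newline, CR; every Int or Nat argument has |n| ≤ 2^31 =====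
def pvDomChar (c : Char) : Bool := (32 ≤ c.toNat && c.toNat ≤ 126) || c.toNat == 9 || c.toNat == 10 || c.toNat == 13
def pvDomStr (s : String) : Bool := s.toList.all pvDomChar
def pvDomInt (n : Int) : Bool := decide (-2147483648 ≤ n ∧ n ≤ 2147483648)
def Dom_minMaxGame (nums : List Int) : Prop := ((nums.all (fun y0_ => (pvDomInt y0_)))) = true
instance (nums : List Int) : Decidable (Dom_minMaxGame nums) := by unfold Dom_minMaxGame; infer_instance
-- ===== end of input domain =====

-- B replaces A's recursive helper (explicit index loop stepping by 2 with an integer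
-- flip accumulator) by an outer while-loop whose pass is a comprehension over
-- range(len//2) picking min/max by the pair index's parity; same return value on Pre_.

-- ===== PORT A =====
-- loop body of A's 'for i in range(0, len(ls), 2)' (state: (tls, flip));
-- ls[i]/ls[i+1] via pyGetD 0: on Pre_ inputs every level has even length, so both
-- indices are in range at every access (Python raises only outside Pre_).
def minMaxGameStepA (ls : List Int) (st : List Int × Int) (i : Int) : List Int × Int :=
  if PySem.Int.mod st.2 2 = 0 then
    (st.1 ++ [min (PySem.List.pyGetD ls i 0) (PySem.List.pyGetD ls (i + 1) 0)], st.2 + 1)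
  else
    (st.1 ++ [max (PySem.List.pyGetD ls i 0) (PySem.List.pyGetD ls (i + 1) 0)], st.2 + 1)

-- A's recursive fn, with fuel: Python recurses once per level; on Pre_ inputs the
-- depth is at most length+1 so the fuel is never exhausted (fuel 0 is only reached
-- outside Pre_, where Python raises RecursionError/IndexError).
def minMaxGameFnA : Nat → List Int → Int
  | 0, _ => 0
  | fuel + 1, ls =>
    if ls.length = 1 then PySem.List.pyGetD ls 0 0
    else
      minMaxGameFnA fuel
        ((PySem.List.pyRange 0 (ls.length : Int) 2).foldl (minMaxGameStepA ls) ([], 0)).1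

def minMaxGame (nums : List Int) : Int := minMaxGameFnA (nums.length + 1) nums

-- ===== PORT B =====
-- one pass of B's while-loop: the comprehension over range(len(cur)//2); the indices
-- 2*j and 2*j+1 are always < len(cur), so pyGetD's default is never used.
def minMaxGameStepB (cur : List Int) : List Int :=
  (PySem.List.pyRange 0 (PySem.Int.floordiv (cur.length : Int) 2) 1).map
    (fun j =>
      if PySem.Int.mod j 2 = 0 then
        min (PySem.List.pyGetD cur (2 * j) 0) (PySem.List.pyGetD cur (2 * j + 1) 0)
      else
        max (PySem.List.pyGetD cur (2 * j) 0) (PySem.List.pyGetD cur (2 * j + 1) 0))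

-- B's 'while len(cur) != 1' loop, with fuel: each pass halves the length, so on any
-- non-empty input length+1 iterations suffice (fuel 0 only on [], where B loops forever).
def minMaxGameLoopB : Nat → List Int → Int
  | 0, _ => 0
  | fuel + 1, cur =>
    if cur.length = 1 then PySem.List.pyGetD cur 0 0
    else minMaxGameLoopB fuel (minMaxGameStepB cur)

def minMaxGame_alt (nums : List Int) : Int := minMaxGameLoopB (nums.length + 1) nums

-- ===== PRECONDITION & SPEC =====
-- A returns normally exactly when the length is a power of two (LeetCode's contract):
-- on [] it hits RecursionError, and any other length reaches an odd level > 1 where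
-- ls[i+1] raises IndexError.
def Pre_minMaxGame (nums : List Int) : Prop := ∃ k ≤ nums.length, nums.length = 2 ^ k
instance (nums : List Int) : Decidable (Pre_minMaxGame nums) := by unfold Pre_minMaxGame; infer_instance
def pvWitness_minMaxGame : List Int := [3, 1, 2, 4]

def Spec_minMaxGame (nums : List Int) (out : Int) : Prop := out = minMaxGame_alt nums
instance (nums : List Int) (out : Int) : Decidable (Spec_minMaxGame nums out) := by unfold Spec_minMaxGame; infer_instance

-- ===== CLAIM (what is proved, stated in full; the proofs are below) =====
def Claim_equal_minMaxGame : Prop := ∀ (nums : List Int), Dom_minMaxGame nums → Pre_minMaxGame nums → Spec_minMaxGame nums (minMaxGame nums)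

-- ===== LEMMAS AND PROOFS =====

-- canonical one-pass combiner both passes are proved equal to (proof-only helper)
def pvChunk : List Int → Bool → List Int
  | a :: b :: t, pm => (if pm then min a b else max a b) :: pvChunk t (!pm)
  | _, _ => []

theorem pvChunk_length : ∀ (ls : List Int) (pm : Bool), (pvChunk ls pm).length = ls.length / 2
  | [], _ => by simp [pvChunk]
  | [_], _ => by simp [pvChunk]
  | a :: b :: t, pm => by
    simp [pvChunk, pvChunk_length t (!pm)]
    omega

theorem pvParityToggle (j : Int) :
    decide (PySem.Int.mod (j + 1) 2 = 0) = ! decide (PySem.Int.mod j 2 = 0) := by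
  rw [PySem.Int.mod_eq_emod_of_pos (a := j) (by norm_num),
      PySem.Int.mod_eq_emod_of_pos (a := j + 1) (by norm_num)]
  by_cases h : j % 2 = 0 <;> simp [h] <;> omega

theorem pvDropTwo (ls : List Int) (i : Nat) (h : i + 1 < ls.length) :
    ls.drop i = ls[i] :: ls[i + 1] :: ls.drop (i + 2) := by
  rw [List.drop_eq_getElem_cons (by omega), List.drop_eq_getElem_cons (by omega)]

theorem pvGetNat (ls : List Int) (i : Nat) (h : i < ls.length) :
    PySem.List.pyGetD ls (i : Int) 0 = ls[i] := by
  rw [PySem.List.pyGetD_of_nonneg ls 0 (by positivity)]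
  simp [List.getD_eq_getElem?_getD, List.getElem?_eq_getElem h]

-- range(a, b, 2) cons step
theorem pvRangeTwoNil (a b : Int) (h : b ≤ a) : PySem.List.pyRange a b 2 = [] := by
  rw [PySem.List.pyRange_of_pos _ _ (by norm_num)]
  simp [not_lt.mpr h]

theorem pvRangeTwoCons (a b : Int) (h : a < b) :
    PySem.List.pyRange a b 2 = a :: PySem.List.pyRange (a + 2) b 2 := by
  rw [PySem.List.pyRange_of_pos _ _ (by norm_num : (0:Int) < 2),
      PySem.List.pyRange_of_pos _ _ (by norm_num : (0:Int) < 2)]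
  by_cases h2 : a + 2 < b
  · have hN : ((b - a + 2 - 1) / 2).toNat = ((b - (a + 2) + 2 - 1) / 2).toNat + 1 := by omega
    rw [if_pos h, if_pos h2, hN, List.range_succ_eq_map]
    simp only [List.map_cons, List.map_map]
    refine congrArg₂ _ (by ring) (List.map_congr_left fun k _ => ?_)
    simp [Function.comp]
    ring
  · have hN : ((b - a + 2 - 1) / 2).toNat = 1 := by omega
    rw [if_pos h, if_neg h2, hN]
    simp

-- A's pass equals pvChunk
theorem pvPassA_aux (ls : List Int) :
    ∀ (c i : Nat) (acc : List Int) (flip : Int),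
      i + 2 * c = ls.length →
      ((PySem.List.pyRange (i : Int) (ls.length : Int) 2).foldl (minMaxGameStepA ls) (acc, flip)).1
        = acc ++ pvChunk (ls.drop i) (decide (PySem.Int.mod flip 2 = 0)) := by
  intro c
  induction c with
  | zero =>
    intro i acc flip hlen
    rw [pvRangeTwoNil _ _ (by omega), List.drop_eq_nil_of_le (by omega)]
    simp [pvChunk]
  | succ c ih =>
    intro i acc flip hlen
    have hi1 : i + 1 < ls.length := by omega
    rw [pvRangeTwoCons _ _ (by exact_mod_cast (by omega : i < ls.length))]
    have hcast : ((i : Int) + 2) = ((i + 2 : Nat) : Int) := by push_cast; ring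
    have hget1 : PySem.List.pyGetD ls (i : Int) 0 = ls[i] := pvGetNat ls i (by omega)
    have hget2 : PySem.List.pyGetD ls ((i : Int) + 1) 0 = ls[i + 1] := by
      have : ((i : Int) + 1) = ((i + 1 : Nat) : Int) := by push_cast; ring
      rw [this]; exact pvGetNat ls (i + 1) hi1
    rw [pvDropTwo ls i hi1]
    by_cases hflip : PySem.Int.mod flip 2 = 0
    · simp only [List.foldl_cons, minMaxGameStepA, if_pos hflip, hget1, hget2]
      rw [hcast, ih (i + 2) _ _ (by omega), pvParityToggle, decide_eq_true hflip]
      simp [pvChunk]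
    · simp only [List.foldl_cons, minMaxGameStepA, if_neg hflip, hget1, hget2]
      rw [hcast, ih (i + 2) _ _ (by omega), pvParityToggle, decide_eq_false hflip]
      simp [pvChunk]

theorem pvPassA (ls : List Int) (h2 : 2 ∣ ls.length) :
    ((PySem.List.pyRange 0 (ls.length : Int) 2).foldl (minMaxGameStepA ls) ([], 0)).1
      = pvChunk ls true := by
  obtain ⟨c, hc⟩ := h2
  have := pvPassA_aux ls c 0 [] 0 (by omega)
  simpa [PySem.Int.mod] using this

-- B's pass equals pvChunk
theorem pvRangeOneNil (a b : Int) (h : b ≤ a) : PySem.List.pyRange a b 1 = [] := by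
  rw [PySem.List.pyRange_of_pos _ _ (by norm_num)]
  simp [not_lt.mpr h]

theorem pvPassB_aux (cur : List Int) (m : Nat) (hm : cur.length = 2 * m) :
    ∀ (c j : Nat), j + c = m →
      ((PySem.List.pyRange (j : Int) (m : Int) 1).map
        (fun j =>
          if PySem.Int.mod j 2 = 0 then
            min (PySem.List.pyGetD cur (2 * j) 0) (PySem.List.pyGetD cur (2 * j + 1) 0)
          else
            max (PySem.List.pyGetD cur (2 * j) 0) (PySem.List.pyGetD cur (2 * j + 1) 0)))
        = pvChunk (cur.drop (2 * j)) (decide (PySem.Int.mod (j : Int) 2 = 0)) := by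
  intro c
  induction c with
  | zero =>
    intro j hj
    rw [pvRangeOneNil _ _ (by exact_mod_cast (by omega : m ≤ j)),
        List.drop_eq_nil_of_le (by omega)]
    simp [pvChunk]
  | succ c ih =>
    intro j hj
    have hjm : (j : Int) < (m : Int) := by exact_mod_cast (by omega : j < m)
    have hj1 : 2 * j + 1 < cur.length := by omega
    rw [PySem.List.pyRange_one_cons hjm, List.map_cons]
    have hget1 : PySem.List.pyGetD cur (2 * (j : Int)) 0 = cur[2 * j] := by
      have : (2 * (j : Int)) = ((2 * j : Nat) : Int) := by push_cast; ring
      rw [this]; exact pvGetNat cur (2 * j) (by omega)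
    have hget2 : PySem.List.pyGetD cur (2 * (j : Int) + 1) 0 = cur[2 * j + 1] := by
      have : (2 * (j : Int) + 1) = ((2 * j + 1 : Nat) : Int) := by push_cast; ring
      rw [this]; exact pvGetNat cur (2 * j + 1) hj1
    have hcast : ((j : Int) + 1) = ((j + 1 : Nat) : Int) := by push_cast; ring
    have hdrop2 : cur.drop (2 * j + 2) = cur.drop (2 * (j + 1)) := by
      have h22 : 2 * j + 2 = 2 * (j + 1) := by omega
      rw [h22]
    rw [pvDropTwo cur (2 * j) hj1]
    by_cases hpar : PySem.Int.mod (j : Int) 2 = 0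
    · rw [if_pos hpar, hget1, hget2, hcast, ih (j + 1) (by omega), ← hdrop2,
          ← hcast, pvParityToggle, decide_eq_true hpar]
      simp [pvChunk]
    · rw [if_neg hpar, hget1, hget2, hcast, ih (j + 1) (by omega), ← hdrop2,
          ← hcast, pvParityToggle, decide_eq_false hpar]
      simp [pvChunk]

theorem pvPassB (cur : List Int) (h2 : 2 ∣ cur.length) :
    minMaxGameStepB cur = pvChunk cur true := by
  obtain ⟨m, hm⟩ := h2
  unfold minMaxGameStepB
  have hfd : PySem.Int.floordiv (cur.length : Int) 2 = (m : Int) := by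
    have := PySem.Int.floordiv_natCast cur.length 2
    rw [show ((2:Nat):Int) = (2:Int) by norm_num] at this
    rw [this, hm]; norm_num
  rw [hfd]
  have := pvPassB_aux cur m hm m 0 (by omega)
  simpa [PySem.Int.mod] using this

-- same fuel, same value, level by level
theorem pvFn_eq : ∀ (fuel : Nat) (ls : List Int) (k : Nat), ls.length = 2 ^ k →
    minMaxGameFnA fuel ls = minMaxGameLoopB fuel ls := by
  intro fuel
  induction fuel with
  | zero => intro ls k _; simp [minMaxGameFnA, minMaxGameLoopB]
  | succ f ih =>
    intro ls k hk
    by_cases h1 : ls.length = 1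
    · simp [minMaxGameFnA, minMaxGameLoopB, h1]
    · have hkpos : k ≠ 0 := by rintro rfl; simp at hk; omega
      have h2 : 2 ∣ ls.length := by
        rw [hk]; exact dvd_pow_self 2 hkpos
      rw [minMaxGameFnA, minMaxGameLoopB, if_neg h1, if_neg h1, pvPassA ls h2, pvPassB ls h2]
      have hk2 : 2 ^ k = 2 * 2 ^ (k - 1) := by
        conv_lhs => rw [show k = (k - 1) + 1 by omega]
        rw [pow_succ']
      exact ih (pvChunk ls true) (k - 1)
        (by rw [pvChunk_length, hk, hk2]; omega)

-- ===== VERDICT (by name: the statement is the Claim_ definition above) =====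
theorem minMaxGame_spec : Claim_equal_minMaxGame := by
  intro nums _ hpre
  obtain ⟨k, _, hk⟩ := hpre
  unfold Spec_minMaxGame minMaxGame minMaxGame_alt
  exact pvFn_eq (nums.length + 1) nums k hk
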